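-- pv_equiv track=rewrite | github.com/petteriTeikari/deep-biblio-tools | src/processors/create_literature_summary.py | extract_citations_and_references
-- ===== SOURCE A (Python) =====
-- def extract_citations_and_references(content):
--     """Extract citations and their corresponding references, preserving hyperlinks."""
--     citations = {}
--     references = []
--
--     # Look for reference section
--     lines = content.split("\n")
--     in_references = False
--     current_ref = []
--
--     for i, line in enumerate(lines):
--         # Check for reference section start
--         if line.strip().lower() in [
--             "references",
--             "bibliography",
--             "## references",
--             "### references",
--         ]:
--             in_references = True
--             continue
--
--         if in_references:
--             # Each reference typically starts with a number or bullet
--             if line.strip() and (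
--                 line.strip()[0].isdigit()
--                 or line.strip().startswith("-")
--                 or line.strip().startswith("•")
--                 or line.strip().startswith("[")
--             ):
--                 if current_ref:
--                     references.append(" ".join(current_ref))
--                 current_ref = [line.strip()]
--             elif line.strip() and current_ref:
--                 current_ref.append(line.strip())
--         else:
--             # Look for inline citations with hyperlinks [Author et al., Year](url)
--             if "[" in line and "](" in line:
--                 start = 0
--                 while True:
--                     bracket_start = line.find("[", start)
--                     if bracket_start == -1:
--                         break
--                     bracket_end = line.find("]", bracket_start)
--                     if bracket_end == -1:
--                         break
--                     paren_start = line.find("(", bracket_end)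
--                     if paren_start != bracket_end + 1:
--                         start = bracket_end + 1
--                         continue
--                     paren_end = line.find(")", paren_start)
--                     if paren_end == -1:
--                         break
--
--                     text = line[bracket_start + 1 : bracket_end]
--                     url = line[paren_start + 1 : paren_end]
--
--                     # Check if this is a citation (contains year)
--                     if any(
--                         year in text for year in ["199", "200", "201", "202"]
--                     ):
--                         citations[text] = url
--
--                     start = paren_end + 1
--
--     if current_ref:
--         references.append(" ".join(current_ref))
--
--     return citations, references
-- ===== SOURCE B (Python) =====
-- # B: split the document once at the first reference-section marker, then two independent
-- # passes: a suffix-partition link scanner feeding a dict comprehension for citations, and a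
-- # group-then-join pass for references (simpler decomposition than A's single stateful loop).
--
-- _MARKERS = {"references", "bibliography", "## references", "### references"}
-- _YEARS = ("199", "200", "201", "202")
--
--
-- def _is_marker(line):
--     return line.strip().lower() in _MARKERS
--
--
-- def _links(line):
--     """All [text](url) pairs of the line, scanning left to right by suffix partition."""
--     out = []
--     rest = line
--     while True:
--         _, sep, rest = rest.partition("[")
--         if not sep:
--             return out
--         text, sep, rest = rest.partition("]")
--         if not sep:
--             return out
--         if rest.startswith("("):
--             url, sep, rest = rest[1:].partition(")")
--             if not sep:
--                 return out
--             out.append((text, url))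
--         # otherwise keep scanning right after the "]"
--
--
-- def extract_citations_and_references(content):
--     lines = content.split("\n")
--     body = []
--     for line in lines:
--         if _is_marker(line):
--             break
--         body.append(line)
--     tail = lines[len(body) + 1 :]
--
--     citations = {
--         text: url
--         for line in body
--         for text, url in _links(line)
--         if any(year in text for year in _YEARS)
--     }
--
--     groups = []
--     for line in tail:
--         s = line.strip()
--         if not s or _is_marker(line):
--             continue
--         if s[0].isdigit() or s[0] in "-•[":
--             groups.append([s])
--         elif groups:
--             groups[-1].append(s)
--     return citations, [" ".join(g) for g in groups]
-- ===== Notes on version B (the rewrite author's own statement) =====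
-- stated objective: alternative
-- what changed: A's single stateful line loop (in_references flag, current_ref buffer, index-based find/while link scanner) is replaced by a split at the first reference-section marker followed by two independent passes: a suffix-partition link scanner feeding a dict comprehension for citations, and a group-then-join accumulation for references.
import Mathlib
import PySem

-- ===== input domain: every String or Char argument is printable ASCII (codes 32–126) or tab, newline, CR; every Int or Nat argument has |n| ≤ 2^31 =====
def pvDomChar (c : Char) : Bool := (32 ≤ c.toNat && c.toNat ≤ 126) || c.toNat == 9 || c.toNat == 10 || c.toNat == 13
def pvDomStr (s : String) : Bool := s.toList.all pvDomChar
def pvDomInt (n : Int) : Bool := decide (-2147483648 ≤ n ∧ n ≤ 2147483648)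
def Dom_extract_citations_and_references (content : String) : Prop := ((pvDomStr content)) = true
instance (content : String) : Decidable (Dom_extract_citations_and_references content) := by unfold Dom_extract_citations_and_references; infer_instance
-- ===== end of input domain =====

-- B restructures A's single stateful line loop into one split at the first reference-section
-- marker followed by two independent passes (suffix-partition link scanner for citations;
-- group-then-join for references); objective: simpler decomposition, same values.

-- ===== PORT A =====

-- the four header strings A recognises
def pvMarkersA : List (List Char) :=
  ["references".toList, "bibliography".toList, "## references".toList, "### references".toList]

-- A's year substrings
def pvYearsA : List (List Char) := ["199".toList, "200".toList, "201".toList, "202".toList]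

-- line.strip().lower() in [...]
def pvIsMarkerLineA (line : List Char) : Bool :=
  pvMarkersA.contains (PySem.Chars.lower (PySem.Chars.strip line))

-- line.strip()[0].isdigit() or line.strip().startswith(...)  (on s = line.strip(), s nonempty)
def pvRefStartA (s : List Char) : Bool :=
  (match s with | c :: _ => PySem.Chars.isdigit c | [] => false)
    || PySem.Chars.startswith s ['-'] || PySem.Chars.startswith s ['•']
    || PySem.Chars.startswith s ['[']

-- A's inner while-loop over find indices; fuel only makes the recursion structural, it is
-- never exhausted when called with fuel = line.length + 1 ≥ the number of iterations.
def pvScanA (line : List Char) : Nat → PySem.Dict String String → Nat → PySem.Dict String String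
  | 0, cits, _ => cits
  | fuel + 1, cits, start =>
    let bs := PySem.Chars.findFrom line ['['] (start : Int)
    if bs = -1 then cits else
    let be := PySem.Chars.findFrom line [']'] bs
    if be = -1 then cits else
    let ps := PySem.Chars.findFrom line ['('] be
    if ps ≠ be + 1 then pvScanA line fuel cits (be.toNat + 1) else
    let pe := PySem.Chars.findFrom line [')'] ps
    if pe = -1 then cits else
    let text := PySem.Chars.slice line (some (bs + 1)) (some be)
    let url := PySem.Chars.slice line (some (ps + 1)) (some pe)
    let cits' := if pvYearsA.any (fun y => PySem.Chars.isIn y text) then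
        cits.insert (String.ofList text) (String.ofList url) else cits
    pvScanA line fuel cits' (pe.toNat + 1)

-- one iteration of A's for-loop; state = (citations, references, in_references, current_ref)
def pvStepA (st : PySem.Dict String String × List String × Bool × List (List Char))
    (line : List Char) : PySem.Dict String String × List String × Bool × List (List Char) :=
  match st with
  | (cits, refs, inRef, cur) =>
    if pvIsMarkerLineA line then (cits, refs, true, cur)
    else if inRef then
      let s := PySem.Chars.strip line
      if s ≠ [] ∧ pvRefStartA s then
        ((cits, (if cur ≠ [] then refs ++ [String.ofList (PySem.Chars.join [' '] cur)] else refs),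
          inRef, [s]))
      else if s ≠ [] ∧ cur ≠ [] then (cits, refs, inRef, cur ++ [s])
      else (cits, refs, inRef, cur)
    else
      if PySem.Chars.isIn ['['] line && PySem.Chars.isIn [']', '('] line then
        (pvScanA line (line.length + 1) cits 0, refs, inRef, cur)
      else (cits, refs, inRef, cur)

def extract_citations_and_references (content : String) :
    (List (String × String)) × List String :=
  let lines := PySem.Chars.splitOn content.toList ['\n']
  match lines.foldl pvStepA (PySem.Dict.empty, ([] : List String), false, ([] : List (List Char))) with
  | (cits, refs, _, cur) =>
    (cits.items,
     refs ++ (if cur ≠ [] then [String.ofList (PySem.Chars.join [' '] cur)] else []))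

-- ===== PORT B =====

def pvMarkersB : List (List Char) :=
  ["references".toList, "bibliography".toList, "## references".toList, "### references".toList]

def pvYearsB : List (List Char) := ["199".toList, "200".toList, "201".toList, "202".toList]

def pvIsMarkerB (line : List Char) : Bool :=
  pvMarkersB.contains (PySem.Chars.lower (PySem.Chars.strip line))

def pvHasYearB (t : List Char) : Bool := pvYearsB.any (fun y => PySem.Chars.isIn y t)

-- s[0].isdigit() or s[0] in "-•["
def pvStartB (s : List Char) : Bool :=
  match s with
  | c :: _ => PySem.Chars.isdigit c || c == '-' || c == '•' || c == '['
  | [] => false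

-- the suffix a span's second component exposes is strictly shorter once non-empty
theorem pv_span2_lt {l t : List Char} {p : Char → Bool} {a : Char}
    (h : (l.span p).2 = a :: t) : t.length < l.length := by
  rw [List.span_eq_takeWhile_dropWhile] at h
  have h2 := List.length_dropWhile_le p l
  simp only at h
  rw [h] at h2
  simp at h2
  omega

-- all [text](url) pairs, scanning left to right by suffix partition
def pvLinksB (cs : List Char) : List (List Char × List Char) :=
  match h1 : (cs.span (· != '[')).2 with
  | [] => []
  | _ :: r2 =>
    match h2 : (r2.span (· != ']')).2 with
    | [] => []
    | _ :: r4 =>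
      if PySem.Chars.startswith r4 ['('] then
        match h3 : ((r4.tail).span (· != ')')).2 with
        | [] => []
        | _ :: r7 => ((r2.span (· != ']')).1, ((r4.tail).span (· != ')')).1) :: pvLinksB r7
      else pvLinksB r4
  termination_by cs.length
  decreasing_by
  · have l1 := pv_span2_lt h1
    have l2 := pv_span2_lt h2
    have l3 := pv_span2_lt h3
    have : r4.tail.length ≤ r4.length := by simp [List.length_tail]
    omega
  · have l1 := pv_span2_lt h1
    have l2 := pv_span2_lt h2
    omega

def extract_citations_and_references_alt (content : String) :
    (List (String × String)) × List String :=
  let lines := PySem.Chars.splitOn content.toList ['\n']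
  let body := lines.takeWhile (fun l => !pvIsMarkerB l)
  let tail := lines.drop (body.length + 1)
  let citations := body.foldl (fun d line =>
      (pvLinksB line).foldl (fun d tu =>
        if pvHasYearB tu.1 then d.insert (String.ofList tu.1) (String.ofList tu.2) else d) d)
    PySem.Dict.empty
  let groups := tail.foldl (fun gs line =>
      let s := PySem.Chars.strip line
      if s.isEmpty || pvIsMarkerB line then gs
      else if pvStartB s then gs ++ [[s]]
      else if gs.isEmpty then gs
      else gs.dropLast ++ [(gs.getLast?.getD []) ++ [s]]) ([] : List (List (List Char)))
  (citations.items, groups.map (fun g => String.ofList (PySem.Chars.join [' '] g)))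

-- ===== PRECONDITION & SPEC =====
def Spec_extract_citations_and_references (content : String) (out : (List (String × String)) × List String) : Prop := out = extract_citations_and_references_alt content
instance (content : String) (out : (List (String × String)) × List String) : Decidable (Spec_extract_citations_and_references content out) := by unfold Spec_extract_citations_and_references; infer_instance

-- ===== CLAIM (what is proved, stated in full; the proofs are below) =====
def Claim_equal_extract_citations_and_references : Prop := ∀ (content : String), Dom_extract_citations_and_references content → Spec_extract_citations_and_references content (extract_citations_and_references content)

-- ===== LEMMAS AND PROOFS =====

theorem pv_singleton_prefix (c : Char) (l : List Char) : [c] <+: l ↔ l.head? = some c := by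
  cases l with
  | nil => simp
  | cons a t => simp [List.cons_prefix_cons, eq_comm]

theorem pv_singleton_infix (c : Char) (l : List Char) : [c] <:+: l ↔ c ∈ l := by
  constructor
  · intro h; exact h.mem (by simp)
  · intro h
    obtain ⟨s, t, hl⟩ := List.append_of_mem h
    exact ⟨s, t, by simp [hl]⟩

theorem pv_prefix_drop (c : Char) (l : List Char) (j : ℕ) :
    [c] <+: l.drop j ↔ l[j]? = some c := by
  rw [pv_singleton_prefix, List.head?_drop]

theorem pv_find_singleton (d : List Char) (c : Char) :
    PySem.Chars.find d [c] =
      (match List.findIdx? (· == c) d with | none => -1 | some i => (i : Int)) := by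
  cases h : List.findIdx? (· == c) d with
  | none =>
    have hm : c ∉ d := by
      intro hc
      have := List.findIdx?_eq_none_iff.mp h c hc
      simp at this
    simpa using (PySem.Chars.find_eq_neg_one_iff d [c]).mpr
      (by rw [pv_singleton_infix]; exact hm)
  | some i =>
    obtain ⟨hi, hci, hmin⟩ := List.findIdx?_eq_some_iff_getElem.mp h
    have hne : PySem.Chars.find d [c] ≠ -1 := by
      intro hn
      rw [PySem.Chars.find_eq_neg_one_iff, pv_singleton_infix] at hn
      simp only [beq_iff_eq] at hci
      exact hn (hci ▸ List.getElem_mem hi)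
    have hspec := PySem.Chars.findFrom_natCast_spec d [c] 0 (Nat.zero_le _)
    rw [Nat.cast_zero, PySem.Chars.findFrom_zero] at hspec
    obtain ⟨h0, hpre, hmin'⟩ := hspec hne
    rw [pv_prefix_drop] at hpre
    have heq : (PySem.Chars.find d [c]).toNat = i := by
      have h1 : ¬ i < (PySem.Chars.find d [c]).toNat := fun hlt =>
        (hmin' i (Nat.zero_le _) hlt) (by rw [pv_prefix_drop]; simp_all)
      have h2 : ¬ (PySem.Chars.find d [c]).toNat < i := fun hlt => by
        have := hmin _ hlt
        rw [List.getElem?_eq_some_iff] at hpre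
        obtain ⟨hh, hg⟩ := hpre
        simp [hg] at this
      omega
    simp only []
    omega


theorem pv_find_singleton_none {d : List Char} {c : Char}
    (h : List.findIdx? (· == c) d = none) : PySem.Chars.find d [c] = -1 := by
  rw [pv_find_singleton, h]

theorem pv_find_singleton_some {d : List Char} {c : Char} {i : ℕ}
    (h : List.findIdx? (· == c) d = some i) : PySem.Chars.find d [c] = (i : Int) := by
  rw [pv_find_singleton, h]

theorem pv_span_none (c : Char) (l : List Char) (h : List.findIdx? (· == c) l = none) :
    l.takeWhile (· != c) = l ∧ l.dropWhile (· != c) = [] := by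
  have hm : ∀ x ∈ l, (x != c) = true := by
    intro x hx
    have := List.findIdx?_eq_none_iff.mp h x hx
    simpa using this
  exact ⟨List.takeWhile_eq_self_iff.mpr hm, List.dropWhile_eq_nil_iff.mpr hm⟩

theorem pv_span_some (c : Char) (l : List Char) (i : ℕ)
    (h : List.findIdx? (· == c) l = some i) :
    l.takeWhile (· != c) = l.take i ∧ l.dropWhile (· != c) = l.drop i := by
  induction l generalizing i with
  | nil => simp at h
  | cons a t ih =>
    rw [List.findIdx?_cons] at h
    by_cases ha : a = c
    · simp [ha] at h
      subst h
      simp [ha]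
    · simp [ha] at h
      obtain ⟨j, hj, hij⟩ := h
      obtain ⟨h1, h2⟩ := ih j hj
      subst hij
      simp [ha, h1, h2]

theorem pv_drop_cons {l : List Char} {i : ℕ} {c : Char} (h : l[i]? = some c) :
    l.drop i = c :: l.drop (i + 1) := by
  rw [List.getElem?_eq_some_iff] at h
  obtain ⟨hi, hg⟩ := h
  rw [List.drop_eq_getElem_cons hi, hg]

theorem pvLinksB_nil1 {cs : List Char} (h : List.findIdx? (· == '[') cs = none) :
    pvLinksB cs = [] := by
  have hs := (pv_span_none '[' cs h).2
  rw [pvLinksB]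
  split
  · rfl
  · rename_i heq
    rw [List.span_eq_takeWhile_dropWhile] at heq
    simp only at heq
    rw [hs] at heq
    cases heq

theorem pv_startswith_char (a c : Char) (t : List Char) :
    PySem.Chars.startswith (a :: t) [c] = (a == c) := by
  simp [PySem.Chars.startswith, List.isPrefixOf, BEq.comm]

theorem pv_findIdx_char {cs : List Char} {c : Char} {i : ℕ}
    (h : List.findIdx? (· == c) cs = some i) : cs[i]? = some c := by
  obtain ⟨hi, hg, -⟩ := List.findIdx?_eq_some_iff_getElem.mp h
  simp only [beq_iff_eq] at hg
  rw [List.getElem?_eq_some_iff]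
  exact ⟨hi, hg⟩

theorem pvLinksB_nil2 {cs : List Char} {i : ℕ}
    (h1 : List.findIdx? (· == '[') cs = some i)
    (h2 : List.findIdx? (· == ']') (cs.drop (i + 1)) = none) :
    pvLinksB cs = [] := by
  have hdw1 : cs.dropWhile (· != '[') = '[' :: cs.drop (i + 1) := by
    rw [(pv_span_some '[' cs i h1).2, pv_drop_cons (pv_findIdx_char h1)]
  have hdw2 : (cs.drop (i + 1)).dropWhile (· != ']') = [] := (pv_span_none ']' _ h2).2
  rw [pvLinksB]
  split
  · rfl
  · rename_i head r2 heq
    rw [List.span_eq_takeWhile_dropWhile] at heq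
    simp only at heq
    rw [hdw1] at heq
    cases heq
    split
    · rfl
    · rename_i heq2
      rw [List.span_eq_takeWhile_dropWhile] at heq2
      simp only at heq2
      rw [hdw2] at heq2
      cases heq2

theorem pvLinksB_skip {cs : List Char} {i j : ℕ}
    (h1 : List.findIdx? (· == '[') cs = some i)
    (h2 : List.findIdx? (· == ']') (cs.drop (i + 1)) = some j)
    (hp : cs[i + j + 2]? ≠ some '(') :
    pvLinksB cs = pvLinksB (cs.drop (i + j + 2)) := by
  have hdw1 : cs.dropWhile (· != '[') = '[' :: cs.drop (i + 1) := by
    rw [(pv_span_some '[' cs i h1).2, pv_drop_cons (pv_findIdx_char h1)]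
  have hdw2 : (cs.drop (i + 1)).dropWhile (· != ']') = ']' :: cs.drop (i + j + 2) := by
    rw [(pv_span_some ']' _ j h2).2, pv_drop_cons (pv_findIdx_char h2), List.drop_drop,
      show i + 1 + (j + 1) = i + j + 2 from by omega]
  rw [pvLinksB]
  split
  · rename_i heq
    rw [List.span_eq_takeWhile_dropWhile] at heq
    simp only at heq
    rw [hdw1] at heq
    cases heq
  · rename_i head r2 heq
    rw [List.span_eq_takeWhile_dropWhile] at heq
    simp only at heq
    rw [hdw1] at heq
    cases heq
    split
    · rename_i heq2
      rw [List.span_eq_takeWhile_dropWhile] at heq2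
      simp only at heq2
      rw [hdw2] at heq2
      cases heq2
    · rename_i head2 r4 heq2
      rw [List.span_eq_takeWhile_dropWhile] at heq2
      simp only at heq2
      rw [hdw2] at heq2
      cases heq2
      rw [if_neg]
      cases hr4 : cs.drop (i + j + 2) with
      | nil => simp [PySem.Chars.startswith, List.isPrefixOf]
      | cons a t =>
        rw [pv_startswith_char]
        have : cs[i + j + 2]? = some a := by
          rw [← List.head?_drop, hr4]
          rfl
        simp only [Bool.not_eq_true, beq_eq_false_iff_ne]
        intro hac
        exact hp (by rw [this, hac])

theorem pvLinksB_nil3 {cs : List Char} {i j : ℕ}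
    (h1 : List.findIdx? (· == '[') cs = some i)
    (h2 : List.findIdx? (· == ']') (cs.drop (i + 1)) = some j)
    (hp : cs[i + j + 2]? = some '(')
    (h4 : List.findIdx? (· == ')') (cs.drop (i + j + 3)) = none) :
    pvLinksB cs = [] := by
  have hdw1 : cs.dropWhile (· != '[') = '[' :: cs.drop (i + 1) := by
    rw [(pv_span_some '[' cs i h1).2, pv_drop_cons (pv_findIdx_char h1)]
  have hdw2 : (cs.drop (i + 1)).dropWhile (· != ']') = ']' :: cs.drop (i + j + 2) := by
    rw [(pv_span_some ']' _ j h2).2, pv_drop_cons (pv_findIdx_char h2), List.drop_drop,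
      show i + 1 + (j + 1) = i + j + 2 from by omega]
  have hr4 : cs.drop (i + j + 2) = '(' :: cs.drop (i + j + 3) := pv_drop_cons hp
  have hdw3 : (cs.drop (i + j + 3)).dropWhile (· != ')') = [] := (pv_span_none ')' _ h4).2
  rw [pvLinksB]
  split
  all_goals try rfl
  all_goals rename_i heq
  all_goals rw [List.span_eq_takeWhile_dropWhile] at heq
  all_goals simp only at heq
  all_goals rw [hdw1] at heq
  all_goals cases heq
  split
  all_goals try rfl
  all_goals rename_i heq2
  all_goals rw [List.span_eq_takeWhile_dropWhile] at heq2
  all_goals simp only at heq2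
  all_goals rw [hdw2] at heq2
  all_goals cases heq2
  rw [if_pos (by rw [hr4, pv_startswith_char]; rfl)]
  split
  all_goals try rfl
  all_goals rename_i heq3
  all_goals rw [List.span_eq_takeWhile_dropWhile] at heq3
  all_goals simp only at heq3
  all_goals rw [hr4] at heq3
  all_goals simp only [List.tail_cons] at heq3
  all_goals rw [hdw3] at heq3
  all_goals cases heq3

theorem pvLinksB_cons {cs : List Char} {i j m : ℕ}
    (h1 : List.findIdx? (· == '[') cs = some i)
    (h2 : List.findIdx? (· == ']') (cs.drop (i + 1)) = some j)
    (hp : cs[i + j + 2]? = some '(')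
    (h4 : List.findIdx? (· == ')') (cs.drop (i + j + 3)) = some m) :
    pvLinksB cs =
      ((cs.drop (i + 1)).take j, (cs.drop (i + j + 3)).take m)
        :: pvLinksB (cs.drop (i + j + m + 4)) := by
  have hdw1 : cs.dropWhile (· != '[') = '[' :: cs.drop (i + 1) := by
    rw [(pv_span_some '[' cs i h1).2, pv_drop_cons (pv_findIdx_char h1)]
  have hdw2 : (cs.drop (i + 1)).dropWhile (· != ']') = ']' :: cs.drop (i + j + 2) := by
    rw [(pv_span_some ']' _ j h2).2, pv_drop_cons (pv_findIdx_char h2), List.drop_drop,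
      show i + 1 + (j + 1) = i + j + 2 from by omega]
  have hr4 : cs.drop (i + j + 2) = '(' :: cs.drop (i + j + 3) := pv_drop_cons hp
  have hdw3 : (cs.drop (i + j + 3)).dropWhile (· != ')') = ')' :: cs.drop (i + j + m + 4) := by
    rw [(pv_span_some ')' _ m h4).2, pv_drop_cons (pv_findIdx_char h4), List.drop_drop,
      show i + j + 3 + (m + 1) = i + j + m + 4 from by omega]
  rw [pvLinksB]
  split
  · rename_i heq
    rw [List.span_eq_takeWhile_dropWhile] at heq
    simp only at heq
    rw [hdw1] at heq
    cases heq
  · rename_i head r2 heq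
    rw [List.span_eq_takeWhile_dropWhile] at heq
    simp only at heq
    rw [hdw1] at heq
    cases heq
    split
    · rename_i heq2
      rw [List.span_eq_takeWhile_dropWhile] at heq2
      simp only at heq2
      rw [hdw2] at heq2
      cases heq2
    · rename_i head2 r4 heq2
      rw [List.span_eq_takeWhile_dropWhile] at heq2
      simp only at heq2
      rw [hdw2] at heq2
      cases heq2
      rw [if_pos (by rw [hr4, pv_startswith_char]; rfl)]
      split
      · rename_i heq3
        rw [List.span_eq_takeWhile_dropWhile] at heq3
        simp only at heq3
        rw [hr4] at heq3
        simp only [List.tail_cons] at heq3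
        rw [hdw3] at heq3
        cases heq3
      · rename_i head3 r7 heq3
        rw [List.span_eq_takeWhile_dropWhile] at heq3
        simp only at heq3
        rw [hr4] at heq3
        simp only [List.tail_cons] at heq3
        rw [hdw3] at heq3
        cases heq3
        rw [List.span_eq_takeWhile_dropWhile, List.span_eq_takeWhile_dropWhile]
        simp only [hr4, List.tail_cons]
        rw [(pv_span_some ']' _ j h2).1, (pv_span_some ')' _ m h4).1]

-- B's per-pair dict update (the lambda in extract_citations_and_references_alt)
def pvStepIns (d : PySem.Dict String String) (tu : List Char × List Char) :
    PySem.Dict String String :=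
  if pvHasYearB tu.1 then d.insert (String.ofList tu.1) (String.ofList tu.2) else d

-- A's find/while scanner computes exactly B's link list folded through the dict update
theorem pv_scan_eq (ln : List Char) (fuel : ℕ) :
    ∀ (start : ℕ) (cits : PySem.Dict String String), start ≤ ln.length →
      ln.length - start < fuel →
      pvScanA ln fuel cits start = (pvLinksB (ln.drop start)).foldl pvStepIns cits := by
  induction fuel with
  | zero => intro start cits hs hf; omega
  | succ fuel ih =>
    intro start cits hs hf
    have hk := PySem.Chars.findFrom_natCast ln ['['] start hs
    cases hfd : List.findIdx? (· == '[') (ln.drop start) with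
    | none =>
      rw [pv_find_singleton_none hfd] at hk
      norm_num at hk
      rw [pvScanA]
      simp only [hk]
      rw [pvLinksB_nil1 hfd]
      rfl
    | some i =>
      rw [pv_find_singleton_some hfd] at hk
      rw [if_neg (by omega)] at hk
      have hbs : PySem.Chars.findFrom ln ['['] (start : Int) = ((start + i : ℕ) : Int) := by
        rw [hk]; push_cast; ring
      obtain ⟨hilt, hig, -⟩ := List.findIdx?_eq_some_iff_getElem.mp hfd
      rw [List.length_drop] at hilt
      have hgi : ln[start + i]? = some '[' := by
        have := pv_findIdx_char hfd
        rwa [List.getElem?_drop] at this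
      -- the ']' search starts at start + i
      have hks : start + i ≤ ln.length := by omega
      have hk2 := PySem.Chars.findFrom_natCast ln [']'] (start + i) hks
      rw [show ln.drop (start + i) = '[' :: ln.drop (start + i + 1) from pv_drop_cons hgi] at hk2
      cases hfd2 : List.findIdx? (· == ']') (ln.drop (start + i + 1)) with
      | none =>
        rw [show PySem.Chars.find ('[' :: ln.drop (start + i + 1)) [']'] = -1 from
          pv_find_singleton_none (by rw [List.findIdx?_cons]; simp [hfd2])] at hk2
        have hbe : PySem.Chars.findFrom ln [']'] ((start + i : ℕ) : Int) = -1 := by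
          rw [hk2]; norm_num
        rw [pvScanA]
        simp only [hbs, hbe]
        rw [if_pos trivial]
        rw [pvLinksB_nil2 hfd (by rw [List.drop_drop, show start + (i + 1) = start + i + 1 from by omega]; exact hfd2)]
        rfl
      | some j =>
        rw [show PySem.Chars.find ('[' :: ln.drop (start + i + 1)) [']'] = ((j + 1 : ℕ) : Int) from
          pv_find_singleton_some (by rw [List.findIdx?_cons]; simp [hfd2])] at hk2
        rw [if_neg (by omega)] at hk2
        have hbe : PySem.Chars.findFrom ln [']'] ((start + i : ℕ) : Int)
            = ((start + i + 1 + j : ℕ) : Int) := by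
          rw [hk2]; push_cast; ring
        obtain ⟨hjlt, -, -⟩ := List.findIdx?_eq_some_iff_getElem.mp hfd2
        rw [List.length_drop] at hjlt
        have hgj : ln[start + i + 1 + j]? = some ']' := by
          have := pv_findIdx_char hfd2
          rwa [List.getElem?_drop, show start + i + 1 + j = start + (i + 1) + j from by omega] at this
        have hkp : start + i + 1 + j ≤ ln.length := by omega
        have hk3 := PySem.Chars.findFrom_natCast ln ['('] (start + i + 1 + j) hkp
        rw [show ln.drop (start + i + 1 + j) = ']' :: ln.drop (start + i + 1 + j + 1) from by
          have := pv_drop_cons hgj; rwa [show start + i + 1 + j + 1 = start + i + 1 + j + 1 from rfl] at this] at hk3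
        cases hfd3 : List.findIdx? (· == '(') (ln.drop (start + i + 1 + j + 1)) with
        | none =>
          rw [show PySem.Chars.find (']' :: ln.drop (start + i + 1 + j + 1)) ['('] = -1 from
            pv_find_singleton_none (by rw [List.findIdx?_cons]; simp [hfd3])] at hk3
          have hpsn : PySem.Chars.findFrom ln ['('] ((start + i + 1 + j : ℕ) : Int) = -1 := by
            rw [hk3]; norm_num
          rw [pvScanA]
          simp only [hbs, hbe, hpsn]
          rw [if_neg (by omega), if_neg (by omega), if_pos (by push_cast; omega)]
          simp only [Int.toNat_natCast]
          rw [ih (start + i + 1 + j + 1) cits (by omega) (by omega)]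
          rw [pvLinksB_skip hfd
            (by rw [List.drop_drop, show start + (i + 1) = start + i + 1 from by omega]; exact hfd2)
            (by
              rw [List.getElem?_drop, show start + (i + j + 2) = start + i + 1 + j + 1 from by omega]
              intro hcon
              have := pv_drop_cons hcon
              rw [this, List.findIdx?_cons] at hfd3
              simp at hfd3)]
          rw [List.drop_drop, show start + (i + j + 2) = start + i + 1 + j + 1 from by omega]
        | some q =>
          rw [show PySem.Chars.find (']' :: ln.drop (start + i + 1 + j + 1)) ['('] = ((q + 1 : ℕ) : Int) from
            pv_find_singleton_some (by rw [List.findIdx?_cons]; simp [hfd3])] at hk3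
          rw [if_neg (by omega)] at hk3
          cases hq : q with
          | succ q' =>
            rw [pvScanA]
            simp only [hbs, hbe, hk3]
            rw [if_neg (by omega), if_neg (by omega), if_pos (by push_cast; omega)]
            simp only [Int.toNat_natCast]
            rw [ih (start + i + 1 + j + 1) cits (by omega) (by omega)]
            rw [pvLinksB_skip hfd
              (by rw [List.drop_drop, show start + (i + 1) = start + i + 1 from by omega]; exact hfd2)
              (by
                rw [List.getElem?_drop, show start + (i + j + 2) = start + i + 1 + j + 1 from by omega]
                intro hcon
                have := pv_drop_cons hcon
                rw [this, List.findIdx?_cons] at hfd3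
                simp at hfd3
                omega)]
            rw [List.drop_drop, show start + (i + j + 2) = start + i + 1 + j + 1 from by omega]
          | zero =>
            subst hq
            have hps : PySem.Chars.findFrom ln ['('] ((start + i + 1 + j : ℕ) : Int)
                = ((start + i + 1 + j + 1 : ℕ) : Int) := by
              rw [hk3]; push_cast; ring
            have hgq : ln[start + i + 1 + j + 1]? = some '(' := by
              have := pv_findIdx_char hfd3
              rwa [List.getElem?_drop, Nat.add_zero] at this
            have hq1 : start + i + 1 + j + 1 ≤ ln.length := by
              have := List.getElem?_eq_some_iff.mp hgq
              omega
            have hk4 := PySem.Chars.findFrom_natCast ln [')'] (start + i + 1 + j + 1) hq1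
            rw [show ln.drop (start + i + 1 + j + 1) = '(' :: ln.drop (start + i + 1 + j + 1 + 1) from pv_drop_cons hgq] at hk4
            cases hfd4 : List.findIdx? (· == ')') (ln.drop (start + i + 1 + j + 1 + 1)) with
            | none =>
              rw [show PySem.Chars.find ('(' :: ln.drop (start + i + 1 + j + 1 + 1)) [')'] = -1 from
                pv_find_singleton_none (by rw [List.findIdx?_cons]; simp [hfd4])] at hk4
              have hpen : PySem.Chars.findFrom ln [')'] ((start + i + 1 + j + 1 : ℕ) : Int) = -1 := by
                rw [hk4]; norm_num
              rw [pvScanA]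
              simp only [hbs, hbe, hps, hpen]
              rw [if_neg (by omega), if_neg (by omega), if_neg (by push_cast; omega)]
              rw [pvLinksB_nil3 hfd
                (by rw [List.drop_drop, show start + (i + 1) = start + i + 1 from by omega]; exact hfd2)
                (by rw [List.getElem?_drop, show start + (i + j + 2) = start + i + 1 + j + 1 from by omega]; exact hgq)
                (by rw [List.drop_drop, show start + (i + j + 3) = start + i + 1 + j + 1 + 1 from by omega]; exact hfd4)]
              rfl
            | some m =>
              rw [show PySem.Chars.find ('(' :: ln.drop (start + i + 1 + j + 1 + 1)) [')'] = ((m + 1 : ℕ) : Int) from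
                pv_find_singleton_some (by rw [List.findIdx?_cons]; simp [hfd4])] at hk4
              rw [if_neg (by omega)] at hk4
              obtain ⟨hmlt, -, -⟩ := List.findIdx?_eq_some_iff_getElem.mp hfd4
              rw [List.length_drop] at hmlt
              have hpe : PySem.Chars.findFrom ln [')'] ((start + i + 1 + j + 1 : ℕ) : Int)
                  = ((start + i + 1 + j + 1 + 1 + m : ℕ) : Int) := by
                rw [hk4]; push_cast; ring
              rw [pvScanA]
              simp only [hbs, hbe, hps, hpe]
              rw [if_neg (by omega), if_neg (by omega), if_neg (by push_cast; omega), if_neg (by omega)]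
              rw [show ((start + i : ℕ) : Int) + 1 = ((start + i + 1 : ℕ) : Int) from by push_cast; ring]
              rw [show ((start + i + 1 + j + 1 : ℕ) : Int) + 1 = ((start + i + 1 + j + 1 + 1 : ℕ) : Int) from by push_cast; ring]
              simp only [PySem.Chars.slice_eq_listSlice, PySem.List.slice_natCast]
              rw [pvLinksB_cons hfd
                (by rw [List.drop_drop, show start + (i + 1) = start + i + 1 from by omega]; exact hfd2)
                (by rw [List.getElem?_drop, show start + (i + j + 2) = start + i + 1 + j + 1 from by omega]; exact hgq)
                (by rw [List.drop_drop, show start + (i + j + 3) = start + i + 1 + j + 1 + 1 from by omega]; exact hfd4)]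
              rw [List.foldl_cons]
              simp only [Int.toNat_natCast]
              rw [show start + i + 1 + j - (start + i + 1) = j from by omega,
                show start + i + 1 + j + 1 + 1 + m - (start + i + 1 + j + 1 + 1) = m from by omega]
              rw [List.drop_drop, List.drop_drop, List.drop_drop]
              rw [show start + (i + 1) = start + i + 1 from by omega,
                show start + (i + j + 3) = start + i + 1 + j + 1 + 1 from by omega,
                show start + (i + j + m + 4) = start + i + 1 + j + 1 + 1 + m + 1 from by omega]
              rw [ih (start + i + 1 + j + 1 + 1 + m + 1) _ (by omega) (by omega)]
              rfl

-- finishing step of A's main function (the trailing current_ref flush)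
def pvFinishA (st : PySem.Dict String String × List String × Bool × List (List Char)) :
    (List (String × String)) × List String :=
  (st.1.items,
   st.2.1 ++ (if st.2.2.2 ≠ [] then [String.ofList (PySem.Chars.join [' '] st.2.2.2)] else []))

-- B's group-accumulator step (the lambda in extract_citations_and_references_alt)
def pvGroupsStepB (gs : List (List (List Char))) (line : List Char) : List (List (List Char)) :=
  let s := PySem.Chars.strip line
  if s.isEmpty || pvIsMarkerB line then gs
  else if pvStartB s then gs ++ [[s]]
  else if gs.isEmpty then gs
  else gs.dropLast ++ [(gs.getLast?.getD []) ++ [s]]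

def pvJoinStr (g : List (List Char)) : String := String.ofList (PySem.Chars.join [' '] g)

-- relation between A's (references, current_ref) state and B's group list
def pvInv (gs : List (List (List Char))) (refs : List String) (cur : List (List Char)) : Prop :=
  (gs = [] ∧ refs = [] ∧ cur = []) ∨
  (gs ≠ [] ∧ refs = (gs.dropLast).map pvJoinStr ∧ cur = gs.getLast?.getD [] ∧ cur ≠ [])

theorem pv_marker_eq (l : List Char) : pvIsMarkerB l = pvIsMarkerLineA l := rfl

theorem pv_start_eq (s : List Char) : pvRefStartA s = pvStartB s := by
  cases s with
  | nil => simp [pvRefStartA, pvStartB, PySem.Chars.startswith, List.isPrefixOf]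
  | cons c t =>
    simp [pvRefStartA, pvStartB, pv_startswith_char]

theorem pv_inv_step (gs : List (List (List Char))) (refs : List String)
    (cur : List (List Char)) (l : List Char) (cits : PySem.Dict String String)
    (hinv : pvInv gs refs cur) :
    ∃ refs' cur', pvStepA (cits, refs, true, cur) l = (cits, refs', true, cur') ∧
      pvInv (pvGroupsStepB gs l) refs' cur' := by
  by_cases hm : pvIsMarkerLineA l = true
  · refine ⟨refs, cur, by simp [pvStepA, hm], ?_⟩
    have hB : pvGroupsStepB gs l = gs := by simp [pvGroupsStepB, pv_marker_eq, hm]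
    rw [hB]; exact hinv
  · have hm' : pvIsMarkerB l = false := by rw [pv_marker_eq]; simpa using hm
    by_cases hempty : PySem.Chars.strip l = []
    · refine ⟨refs, cur, by simp [pvStepA, hm, hempty], ?_⟩
      have hB : pvGroupsStepB gs l = gs := by simp [pvGroupsStepB, hempty, hm']
      rw [hB]; exact hinv
    · have hie : (PySem.Chars.strip l).isEmpty = false := by
        simp [hempty]
      by_cases hstart : pvRefStartA (PySem.Chars.strip l) = true
      · have hstart' : pvStartB (PySem.Chars.strip l) = true := by
          rw [← pv_start_eq]; exact hstart
        have hB : pvGroupsStepB gs l = gs ++ [[PySem.Chars.strip l]] := by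
          simp [pvGroupsStepB, hie, hm', hstart']
        refine ⟨if cur ≠ [] then refs ++ [String.ofList (PySem.Chars.join [' '] cur)] else refs,
          [PySem.Chars.strip l], by simp [pvStepA, hm, hempty, hstart], ?_⟩
        rw [hB]
        right
        refine ⟨by simp, ?_, by rw [List.getLast?_concat]; rfl, by simp⟩
        rw [List.dropLast_concat]
        rcases hinv with ⟨h1, h2, h3⟩ | ⟨h1, h2, h3, h4⟩
        · subst h1; simp [h2, h3]
        · rw [if_pos h4, h2, h3, List.getLast?_eq_some_getLast h1]
          simp only [Option.getD_some]
          have hgl := List.dropLast_concat_getLast h1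
          conv_rhs => rw [← hgl]
          simp [pvJoinStr]
      · have hstart' : pvStartB (PySem.Chars.strip l) = false := by
          rw [← pv_start_eq]; simpa using hstart
        refine ⟨refs, if cur ≠ [] then cur ++ [PySem.Chars.strip l] else cur,
          by simp [pvStepA, hm, hempty, hstart]; split <;> simp_all, ?_⟩
        rcases hinv with ⟨h1, h2, h3⟩ | ⟨h1, h2, h3, h4⟩
        · subst h1
          have hB : pvGroupsStepB [] l = [] := by simp [pvGroupsStepB, hie, hm', hstart']
          rw [hB, if_neg (by simp [h3])]
          exact Or.inl ⟨rfl, h2, h3⟩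
        · have hB : pvGroupsStepB gs l
              = gs.dropLast ++ [(gs.getLast?.getD []) ++ [PySem.Chars.strip l]] := by
            simp only [pvGroupsStepB, hie, hm', hstart']
            rw [if_neg (by simp), if_neg (by simp), if_neg (by simpa using h1)]
          rw [hB, if_pos h4]
          right
          refine ⟨by simp, ?_, ?_, by simp [h3]⟩
          · rw [List.dropLast_concat]; exact h2
          · rw [List.getLast?_concat, h3]; rfl

theorem pv_ref_phase (ls : List (List Char)) :
    ∀ (refs : List String) (cur : List (List Char)) (gs : List (List (List Char)))
      (cits : PySem.Dict String String), pvInv gs refs cur →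
      pvFinishA (ls.foldl pvStepA (cits, refs, true, cur)) =
        (cits.items, (ls.foldl pvGroupsStepB gs).map pvJoinStr) := by
  induction ls with
  | nil =>
    intro refs cur gs cits hinv
    rcases hinv with ⟨h1, h2, h3⟩ | ⟨h1, h2, h3, h4⟩
    · subst h1; subst h2; subst h3
      simp [pvFinishA]
    · simp only [List.foldl_nil, pvFinishA]
      rw [if_pos h4]
      rw [h2, h3, List.getLast?_eq_some_getLast h1]
      simp only [Option.getD_some]
      have := List.dropLast_concat_getLast h1
      conv_rhs => rw [← this]
      simp [pvJoinStr]
  | cons l ls ih =>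
    intro refs cur gs cits hinv
    obtain ⟨refs', cur', hstep, hinv'⟩ := pv_inv_step gs refs cur l cits hinv
    rw [List.foldl_cons, hstep, List.foldl_cons]
    exact ih refs' cur' (pvGroupsStepB gs l) cits hinv'

-- a line with no "](" yields no links
theorem pv_links_no_seq_aux (n : ℕ) :
    ∀ (cs : List Char), cs.length ≤ n → ¬ ([']', '('] <:+: cs) → pvLinksB cs = [] := by
  induction n with
  | zero =>
    intro cs hlen _
    have : cs = [] := by cases cs <;> simp_all
    subst this
    exact pvLinksB_nil1 (by simp)
  | succ n ih =>
    intro cs hlen hinf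
    cases hfd : List.findIdx? (· == '[') cs with
    | none => exact pvLinksB_nil1 hfd
    | some i =>
      cases hfd2 : List.findIdx? (· == ']') (cs.drop (i + 1)) with
      | none => exact pvLinksB_nil2 hfd hfd2
      | some j =>
        have hgj : cs[i + 1 + j]? = some ']' := by
          have := pv_findIdx_char hfd2
          rwa [List.getElem?_drop] at this
        by_cases hp : cs[i + j + 2]? = some '('
        · exfalso
          apply hinf
          have h1 : cs.drop (i + 1 + j) = ']' :: cs.drop (i + 1 + j + 1) := pv_drop_cons hgj
          have h2 : cs.drop (i + 1 + j + 1) = '(' :: cs.drop (i + 1 + j + 1 + 1) := by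
            apply pv_drop_cons
            rwa [show i + 1 + j + 1 = i + j + 2 from by omega]
          have hpre : [']', '('] <+: cs.drop (i + 1 + j) := by
            rw [h1, h2]
            exact ⟨cs.drop (i + 1 + j + 1 + 1), rfl⟩
          exact hpre.isInfix.trans (cs.drop_suffix (i + 1 + j)).isInfix
        · rw [pvLinksB_skip hfd hfd2 hp]
          apply ih
          · have hi := List.findIdx?_eq_some_iff_getElem.mp hfd
            have : i < cs.length := hi.1
            have := List.length_drop (l := cs) (i := i + j + 2)
            omega
          · intro hc
            exact hinf (hc.trans (cs.drop_suffix (i + j + 2)).isInfix)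

theorem pv_links_no_seq {cs : List Char} (h : ¬ ([']', '('] <:+: cs)) : pvLinksB cs = [] :=
  pv_links_no_seq_aux cs.length cs le_rfl h

-- the citation update A performs on one non-reference line
theorem pv_cit_line (l : List Char) (cits : PySem.Dict String String) :
    (if PySem.Chars.isIn ['['] l && PySem.Chars.isIn [']', '('] l then
        pvScanA l (l.length + 1) cits 0 else cits) =
      (pvLinksB l).foldl pvStepIns cits := by
  by_cases hg : (PySem.Chars.isIn ['['] l && PySem.Chars.isIn [']', '('] l) = true
  · rw [if_pos hg]
    have := pv_scan_eq l (l.length + 1) 0 cits (Nat.zero_le _) (by omega)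
    rwa [List.drop_zero] at this
  · rw [if_neg hg]
    simp only [Bool.and_eq_true, not_and_or, Bool.not_eq_true] at hg
    rcases hg with hg | hg
    · have : ('[' : Char) ∉ l := by
        intro hm
        have : PySem.Chars.isIn ['['] l = true := by
          rw [PySem.Chars.isIn_iff_infix, pv_singleton_infix]
          exact hm
        simp [this] at hg
      rw [pvLinksB_nil1 (List.findIdx?_eq_none_iff.mpr (fun x hx => by
        simp only [beq_eq_false_iff_ne]
        intro he; subst he; exact this hx))]
      rfl
    · rw [pv_links_no_seq (by rw [← PySem.Chars.isIn_iff_infix]; simp [hg])]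
      rfl

-- the full body phase: citations accumulate until the first marker line, references after it
theorem pv_body_phase (ls : List (List Char)) :
    ∀ (cits : PySem.Dict String String),
      pvFinishA (ls.foldl pvStepA (cits, [], false, [])) =
        (((ls.takeWhile (fun l => !pvIsMarkerB l)).foldl
            (fun d line => (pvLinksB line).foldl pvStepIns d) cits).items,
         ((ls.drop ((ls.takeWhile (fun l => !pvIsMarkerB l)).length + 1)).foldl
            pvGroupsStepB []).map pvJoinStr) := by
  induction ls with
  | nil => intro cits; simp [pvFinishA]
  | cons l ls ih =>
    intro cits
    by_cases hm : pvIsMarkerLineA l = true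
    · rw [List.foldl_cons]
      rw [show pvStepA (cits, [], false, []) l = (cits, [], true, []) from by simp [pvStepA, hm]]
      rw [pv_ref_phase ls [] [] [] cits (Or.inl ⟨rfl, rfl, rfl⟩)]
      rw [List.takeWhile_cons, show (!pvIsMarkerB l) = false from by rw [pv_marker_eq]; simp [hm]]
      simp
    · rw [List.foldl_cons]
      rw [show pvStepA (cits, [], false, []) l =
          ((if PySem.Chars.isIn ['['] l && PySem.Chars.isIn [']', '('] l then
            pvScanA l (l.length + 1) cits 0 else cits), [], false, []) from by
        simp [pvStepA, hm]
        split <;> rfl]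
      rw [pv_cit_line]
      rw [ih ((pvLinksB l).foldl pvStepIns cits)]
      rw [List.takeWhile_cons, show (!pvIsMarkerB l) = true from by rw [pv_marker_eq]; simpa using hm]
      simp

-- ===== VERDICT (by name: the statement is the Claim_ definition above) =====
theorem extract_citations_and_references_spec : Claim_equal_extract_citations_and_references := by
  intro content _
  unfold Spec_extract_citations_and_references
  show pvFinishA ((PySem.Chars.splitOn content.toList ['\n']).foldl pvStepA
    (PySem.Dict.empty, [], false, [])) = _
  rw [pv_body_phase]
  rfl
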